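-- pv_equiv track=rewrite | github.com/blu3r4y/ccc-linz-oct2023 | ccc/routes.py | check_intersect
-- ===== SOURCE A (Python) =====
-- from typing import List, Tuple
--
-- def check_intersect(route: List[Tuple[int, int]]):
--     length = len(route)
--     if length != len(set(route)):
--         return True  # duplicate points
--
--     forbidden = set()
--
--     # iterate over (x,y) pairs with window size 2
--     for (x1, y1), (x2, y2) in zip(route, route[1:]):
--         if ((x1, y1), (x2, y2)) in forbidden:
--             return True
--
--         vec_type = _identify_vector_type((x1, y1), (x2, y2))
--         if vec_type == "d+" or vec_type == "d-":
--             # block the other two diagonals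
--             forbidden.add(((x1, y2), (x2, y1)))
--             forbidden.add(((x2, y1), (x1, y2)))
--
--     return False
--
-- def _identify_vector_type(a: Tuple[int, int], b: Tuple[int, int]) -> str:
--     # check if a -> b is horizontal, vertical,
--     # or diagonal (positive, negative)
--     ax, ay = a
--     bx, by = b
--
--     if ax == bx:
--         return "v"
--     if ay == by:
--         return "h"
--     if ax < bx:
--         if ay < by:
--             return "d+"
--         else:
--             return "d-"
--     else:
--         if ay < by:
--             return "d-"
--         else:
--             return "d+"
-- ===== SOURCE B (Python) =====
-- from typing import List, Tuple
--
-- def check_intersect(route: List[Tuple[int, int]]):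
--     if len(route) != len(set(route)):
--         return True  # duplicate points
--
--     # keep only the diagonal edges, then compare all pairs geometrically:
--     # two diagonal edges cross iff they are opposite diagonals of one rectangle
--     diag = [(p, q) for p, q in zip(route, route[1:]) if p[0] != q[0] and p[1] != q[1]]
--     for j, (b1, b2) in enumerate(diag):
--         for (a1, a2) in diag[:j]:
--             anti = ((a1[0], a2[1]), (a2[0], a1[1]))
--             if (b1, b2) == anti or (b2, b1) == anti:
--                 return True
--     return False
-- ===== Notes on version B (the rewrite author's own statement) =====
-- stated objective: alternative
-- what changed: Replaces A's single pass that accumulates a hash set of forbidden anti-diagonal edges with: filter the consecutive edges to the diagonal ones, then an explicit pairwise double loop that returns True when a later diagonal edge is, in either orientation, the opposite diagonal of an earlier one's rectangle.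
import Mathlib
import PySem

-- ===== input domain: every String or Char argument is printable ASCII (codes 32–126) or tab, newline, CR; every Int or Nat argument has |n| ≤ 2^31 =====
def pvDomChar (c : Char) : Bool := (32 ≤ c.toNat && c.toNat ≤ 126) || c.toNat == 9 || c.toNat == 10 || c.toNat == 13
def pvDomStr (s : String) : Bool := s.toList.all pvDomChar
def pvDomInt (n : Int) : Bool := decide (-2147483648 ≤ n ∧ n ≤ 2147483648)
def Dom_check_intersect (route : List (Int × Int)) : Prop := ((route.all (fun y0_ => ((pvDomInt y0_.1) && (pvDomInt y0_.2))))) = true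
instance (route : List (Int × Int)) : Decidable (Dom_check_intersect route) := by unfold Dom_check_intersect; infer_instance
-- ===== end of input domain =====

-- B replaces A's online set of forbidden diagonals by: filter the consecutive edges to the
-- diagonal ones, then compare every ordered pair geometrically (opposite diagonals of one
-- rectangle); objective: alternative decomposition, not faster.

-- ===== PORT A =====
def identify_vector_type (a b : Int × Int) : String :=
  let ax := a.1; let ay := a.2; let bx := b.1; let byy := b.2
  if ax == bx then "v"
  else if ay == byy then "h"
  else if ax < bx then (if ay < byy then "d+" else "d-")
  else (if ay < byy then "d-" else "d+")

def aLoop : List ((Int × Int) × (Int × Int)) → PySem.Set ((Int × Int) × (Int × Int)) → Bool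
  | [], _ => false
  | e :: rest, forbidden =>
    if PySem.Set.contains forbidden e then true
    else
      let x1 := e.1.1; let y1 := e.1.2; let x2 := e.2.1; let y2 := e.2.2
      let vt := identify_vector_type (x1, y1) (x2, y2)
      let forbidden' :=
        if vt == "d+" || vt == "d-" then
          PySem.Set.add (PySem.Set.add forbidden ((x1, y2), (x2, y1))) ((x2, y1), (x1, y2))
        else forbidden
      aLoop rest forbidden'

def check_intersect (route : List (Int × Int)) : Bool :=
  let length := route.length
  if length != (PySem.Set.ofList route).length then true
  else aLoop (route.zip (PySem.List.slice route (some 1) none)) PySem.Set.empty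

-- ===== PORT B =====
-- match test of Source B's inner loop: edge e equals the anti-diagonal of a, in either orientation
def antiMatch (a e : (Int × Int) × (Int × Int)) : Bool :=
  let anti : (Int × Int) × (Int × Int) := ((a.1.1, a.2.2), (a.2.1, a.1.2))
  e == anti || (e.2, e.1) == anti

-- Source B's filter condition: both coordinates change, i.e. the edge is diagonal
def diagB (e : (Int × Int) × (Int × Int)) : Bool := e.1.1 != e.2.1 && e.1.2 != e.2.2

def check_intersect_alt (route : List (Int × Int)) : Bool :=
  if route.length != (PySem.Set.ofList route).length then true
  else
    let diag := (route.zip (PySem.List.slice route (some 1) none)).filter diagB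
    (PySem.List.enumerate diag).any (fun je =>
      (PySem.List.slice diag none (some je.1)).any (fun a => antiMatch a je.2))

-- ===== PRECONDITION & SPEC =====
def Spec_check_intersect (route : List (Int × Int)) (out : Bool) : Prop := out = check_intersect_alt route
instance (route : List (Int × Int)) (out : Bool) : Decidable (Spec_check_intersect route out) := by unfold Spec_check_intersect; infer_instance

-- ===== CLAIM (what is proved, stated in full; the proofs are below) =====
def Claim_equal_check_intersect : Prop := ∀ (route : List (Int × Int)), Dom_check_intersect route → Spec_check_intersect route (check_intersect route)

-- ===== LEMMAS AND PROOFS =====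

-- intermediate form of B: scan the diagonal edges, comparing each with all earlier ones
def bLoop : List ((Int × Int) × (Int × Int)) → List ((Int × Int) × (Int × Int)) → Bool
  | _, [] => false
  | prev, e :: rest => prev.any (fun a => antiMatch a e) || bLoop (prev ++ [e]) rest

theorem identify_diag (p q : Int × Int) :
    ((identify_vector_type p q == "d+") || (identify_vector_type p q == "d-")) = diagB (p, q) := by
  simp only [identify_vector_type, diagB]
  split_ifs <;> simp_all

theorem antiMatch_diag {a e : (Int × Int) × (Int × Int)} (ha : diagB a = true)
    (h : antiMatch a e = true) : diagB e = true := by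
  obtain ⟨⟨e11, e12⟩, e21, e22⟩ := e
  obtain ⟨⟨a11, a12⟩, a21, a22⟩ := a
  simp only [antiMatch, Bool.or_eq_true, beq_iff_eq, Prod.mk.injEq] at h
  simp only [diagB, Bool.and_eq_true, bne_iff_ne, ne_eq] at ha ⊢
  rcases h with ⟨⟨h1, h2⟩, h3, h4⟩ | ⟨⟨h1, h2⟩, h3, h4⟩ <;> constructor <;> omega

theorem aLoop_eq_bLoop (edges : List ((Int × Int) × (Int × Int))) :
    ∀ (prev : List ((Int × Int) × (Int × Int))) (forb : PySem.Set ((Int × Int) × (Int × Int))),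
    (∀ a ∈ prev, diagB a = true) →
    (∀ e, e ∈ forb ↔ ∃ a ∈ prev, antiMatch a e = true) →
    aLoop edges forb = bLoop prev (edges.filter diagB) := by
  induction edges with
  | nil => intro prev forb _ _; simp [aLoop, List.filter, bLoop]
  | cons e rest ih =>
    intro prev forb hprev hmem
    obtain ⟨⟨x1, y1⟩, x2, y2⟩ := e
    have hcontains : PySem.Set.contains forb ((x1, y1), (x2, y2))
        = prev.any (fun a => antiMatch a ((x1, y1), (x2, y2))) := by
      by_cases hin : ((x1, y1), (x2, y2)) ∈ forb
      · rw [(PySem.Set.contains_iff forb _).mpr hin]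
        obtain ⟨a, ha, hA⟩ := (hmem _).mp hin
        exact (List.any_eq_true.mpr ⟨a, ha, hA⟩).symm
      · have h1 : PySem.Set.contains forb ((x1, y1), (x2, y2)) = false := by
          by_contra h
          exact hin ((PySem.Set.contains_iff forb _).mp
            (by revert h; cases PySem.Set.contains forb ((x1, y1), (x2, y2)) <;> simp))
        rw [h1]
        symm; rw [List.any_eq_false]
        exact fun a ha hA => hin ((hmem _).mpr ⟨a, ha, hA⟩)
    simp only [aLoop]
    rw [hcontains, identify_diag]
    cases hd : diagB ((x1, y1), (x2, y2)) with
    | true =>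
      have hfil : (((x1, y1), (x2, y2)) :: rest).filter diagB
          = ((x1, y1), (x2, y2)) :: rest.filter diagB := by
        simp [hd]
      rw [hfil]
      cases hprevany : prev.any (fun a => antiMatch a ((x1, y1), (x2, y2))) with
      | true => simp [bLoop, hprevany]
      | false =>
        simp only [bLoop, hprevany, Bool.false_eq_true, if_false, if_true, Bool.false_or]
        apply ih (prev ++ [((x1, y1), (x2, y2))])
        · intro a ha
          rcases List.mem_append.mp ha with h | h
          · exact hprev a h
          · simp at h; subst h; exact hd
        · intro e'
          rw [PySem.Set.mem_add, PySem.Set.mem_add]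
          constructor
          · rintro ((h | h) | h)
            · obtain ⟨a, ha, hA⟩ := (hmem e').mp h
              exact ⟨a, List.mem_append.mpr (Or.inl ha), hA⟩
            · exact ⟨((x1, y1), (x2, y2)), List.mem_append.mpr (Or.inr (by simp)),
                by simp [antiMatch, h]⟩
            · exact ⟨((x1, y1), (x2, y2)), List.mem_append.mpr (Or.inr (by simp)),
                by subst h; simp [antiMatch]⟩
          · rintro ⟨a, ha, hA⟩
            rcases List.mem_append.mp ha with h | h
            · exact Or.inl (Or.inl ((hmem e').mpr ⟨a, h, hA⟩))
            · simp at h; subst h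
              simp only [antiMatch, Bool.or_eq_true, beq_iff_eq] at hA
              rcases hA with h | h
              · exact Or.inl (Or.inr h)
              · right
                obtain ⟨⟨p1, p2⟩, q1, q2⟩ := e'
                simp [Prod.ext_iff] at h ⊢
                omega
    | false =>
      have hfil : (((x1, y1), (x2, y2)) :: rest).filter diagB = rest.filter diagB := by
        simp [hd]
      have hprevany : prev.any (fun a => antiMatch a ((x1, y1), (x2, y2))) = false := by
        rw [List.any_eq_false]
        intro a ha hA
        rw [antiMatch_diag (hprev a ha) hA] at hd
        exact absurd hd (by simp)
      rw [hprevany, hfil]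
      simp only [Bool.false_eq_true, if_false]
      exact ih prev forb hprev hmem

theorem bLoop_enum (l : List ((Int × Int) × (Int × Int))) :
    ∀ (prev : List ((Int × Int) × (Int × Int))),
    bLoop prev l = (PySem.List.enumerate l (prev.length : Int)).any
      (fun je => (PySem.List.slice (prev ++ l) none (some je.1)).any (fun a => antiMatch a je.2)) := by
  induction l with
  | nil => intro prev; simp [bLoop, PySem.List.enumerate_nil]
  | cons e rest ih =>
    intro prev
    rw [PySem.List.enumerate_cons]
    simp only [bLoop, List.any_cons]
    congr 1
    · rw [PySem.List.slice_to_natCast]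
      rw [List.take_append_of_le_length (by simp), List.take_length]
    · have h1 : ((prev.length : Int) + 1) = (((prev ++ [e]).length : Nat) : Int) := by simp
      have h2 : prev ++ e :: rest = (prev ++ [e]) ++ rest := by simp
      rw [h1, h2, ← ih (prev ++ [e])]

-- ===== VERDICT (by name: the statement is the Claim_ definition above) =====
theorem check_intersect_spec : Claim_equal_check_intersect := by
  intro route _
  unfold Spec_check_intersect check_intersect check_intersect_alt
  cases hdup : (route.length != (PySem.Set.ofList route).length) with
  | true => simp [hdup]
  | false =>
    simp only [hdup, Bool.false_eq_true, if_false]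
    rw [aLoop_eq_bLoop _ [] PySem.Set.empty (by simp) (by simp [PySem.Set.empty])]
    rw [bLoop_enum _ []]
    simp
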